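-- pv_equiv track=rewrite | github.com/vernonclarke/SPNfinal | master_functions.py | gaba_onset
-- ===== SOURCE A (Python) =====
-- def gaba_onset(gaba_time, num_gabas, num_branch2, model=1):
--     if model == 0:
--         gaba_onsets = list(range(gaba_time, gaba_time + int(num_gabas/3)+1)) * 3 * num_branch2
--         gaba_onsets = gaba_onsets[:num_gabas]
--     else:
--         if num_branch2 in [0,1]:
--             if (num_gabas < 4):
--                 gaba_onsets = list(range(gaba_time, gaba_time + num_gabas))
--             else:
--                 if num_gabas % 3 == 0:
--                     gaba_onsets = list(range(gaba_time, gaba_time + int(num_gabas/3))) * 3 * num_branch2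
--                 else:
--                     gaba_onsets = list(range(gaba_time, gaba_time + int(num_gabas/3)+1)) * 3 * num_branch2
--             gaba_onsets = gaba_onsets[:num_gabas]
--         else:
--             onsets = list(range(gaba_time, gaba_time + num_gabas))
--             gaba_onsets = [x for x in onsets for _ in range(num_branch2)]
--     return gaba_onsets
-- ===== SOURCE B (Python) =====
-- def gaba_onset(gaba_time, num_gabas, num_branch2, model=1):
--     # Compute each onset directly by index arithmetic (i % block_len tiles the
--     # block, i // num_branch2 repeats each onset), instead of materialising and
--     # replicating intermediate lists.
--     if model != 0 and num_branch2 not in (0, 1):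
--         n = max(num_gabas, 0) * max(num_branch2, 0)
--         return [gaba_time + i // num_branch2 for i in range(n)]
--     if model == 0:
--         blen, reps = num_gabas // 3 + 1, 3 * num_branch2
--     elif num_gabas < 4:
--         blen, reps = num_gabas, 1
--     elif num_gabas % 3 == 0:
--         blen, reps = num_gabas // 3, 3 * num_branch2
--     else:
--         blen, reps = num_gabas // 3 + 1, 3 * num_branch2
--     n = min(num_gabas, blen * reps)
--     return [gaba_time + i % blen for i in range(n)]
-- ===== Notes on version B (the rewrite author's own statement) =====
-- stated objective: alternative
-- what changed: B computes each output element directly by index arithmetic - gaba_time + i % block_len for the tiled branches and gaba_time + i // num_branch2 for the per-onset repetition branch - with the output length obtained in closed form, instead of A's pipeline of building a block list, replicating it 3*num_branch2 times (or a nested comprehension) and slicing.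
-- intended difference: For model==0 with num_gabas in {-1,-2} and num_branch2 >= 1, A's truncating int(num_gabas/3) makes a 1-element block and the negative [:num_gabas] slice then returns 3*num_branch2+num_gabas copies of gaba_time, while B returns [], the intended result of requesting a negative number of onsets. — e.g. on gaba_onset(10, -1, 1, 0): A returns [10, 10], B returns []
import Mathlib
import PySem

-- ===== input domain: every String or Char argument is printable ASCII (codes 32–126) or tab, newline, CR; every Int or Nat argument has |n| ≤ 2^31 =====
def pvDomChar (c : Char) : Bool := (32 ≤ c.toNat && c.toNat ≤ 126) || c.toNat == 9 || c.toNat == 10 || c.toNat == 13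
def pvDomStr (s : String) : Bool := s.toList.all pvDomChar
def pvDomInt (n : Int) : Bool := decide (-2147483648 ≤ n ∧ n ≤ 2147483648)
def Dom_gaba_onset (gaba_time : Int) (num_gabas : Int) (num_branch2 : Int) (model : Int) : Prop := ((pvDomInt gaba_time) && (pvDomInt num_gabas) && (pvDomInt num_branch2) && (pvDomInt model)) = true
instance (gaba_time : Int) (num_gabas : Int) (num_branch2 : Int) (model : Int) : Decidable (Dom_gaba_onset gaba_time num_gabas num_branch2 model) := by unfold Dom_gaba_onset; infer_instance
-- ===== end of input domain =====

-- B computes each onset directly by index arithmetic (i % block_len / i // num_branch2)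
-- instead of A's replicate-then-slice list pipeline; same output-linear cost, alternative algorithm.

-- ===== PORT A =====
-- Python's int(num_gabas/3) is exact truncating division here (|num_gabas| ≤ 2^31 < 2^53): PySem.Int.truncdiv.
def gaba_onset (gaba_time : Int) (num_gabas : Int) (num_branch2 : Int) (model : Int) : List Int :=
  if model = 0 then
    let gaba_onsets := PySem.List.pyRepeat (PySem.List.pyRepeat
      (PySem.List.pyRange gaba_time (gaba_time + PySem.Int.truncdiv num_gabas 3 + 1) 1) 3) num_branch2
    PySem.List.slice gaba_onsets none (some num_gabas)
  else
    if num_branch2 = 0 ∨ num_branch2 = 1 then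
      let gaba_onsets :=
        if num_gabas < 4 then
          PySem.List.pyRange gaba_time (gaba_time + num_gabas) 1
        else if PySem.Int.mod num_gabas 3 = 0 then
          PySem.List.pyRepeat (PySem.List.pyRepeat
            (PySem.List.pyRange gaba_time (gaba_time + PySem.Int.truncdiv num_gabas 3) 1) 3) num_branch2
        else
          PySem.List.pyRepeat (PySem.List.pyRepeat
            (PySem.List.pyRange gaba_time (gaba_time + PySem.Int.truncdiv num_gabas 3 + 1) 1) 3) num_branch2
      PySem.List.slice gaba_onsets none (some num_gabas)
    else
      (PySem.List.pyRange gaba_time (gaba_time + num_gabas) 1).flatMap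
        (fun x => (PySem.List.pyRange 0 num_branch2 1).map (fun _ => x))

-- ===== PORT B =====
def gaba_onset_alt (gaba_time : Int) (num_gabas : Int) (num_branch2 : Int) (model : Int) : List Int :=
  if model ≠ 0 ∧ ¬(num_branch2 = 0 ∨ num_branch2 = 1) then
    let n := max num_gabas 0 * max num_branch2 0
    (PySem.List.pyRange 0 n 1).map (fun i => gaba_time + PySem.Int.floordiv i num_branch2)
  else
    let p : Int × Int :=
      if model = 0 then (PySem.Int.floordiv num_gabas 3 + 1, 3 * num_branch2)
      else if num_gabas < 4 then (num_gabas, 1)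
      else if PySem.Int.mod num_gabas 3 = 0 then (PySem.Int.floordiv num_gabas 3, 3 * num_branch2)
      else (PySem.Int.floordiv num_gabas 3 + 1, 3 * num_branch2)
    let n := min num_gabas (p.1 * p.2)
    (PySem.List.pyRange 0 n 1).map (fun i => gaba_time + PySem.Int.mod i p.1)

-- ===== PRECONDITION & SPEC =====
-- For model==0 with num_gabas in {-1,-2} and num_branch2 ≥ 1, A's truncating int(num_gabas/3)
-- yields a 1-element block and the negative [:num_gabas] slice then returns 3*num_branch2+num_gabas
-- copies of gaba_time; B returns [], the intended result of requesting a negative number of onsets.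
def D_gaba_onset (gaba_time : Int) (num_gabas : Int) (num_branch2 : Int) (model : Int) : Prop :=
  model = 0 ∧ (num_gabas = -1 ∨ num_gabas = -2) ∧ 1 ≤ num_branch2
instance (gaba_time : Int) (num_gabas : Int) (num_branch2 : Int) (model : Int) : Decidable (D_gaba_onset gaba_time num_gabas num_branch2 model) := by unfold D_gaba_onset; infer_instance

def Spec_gaba_onset (gaba_time : Int) (num_gabas : Int) (num_branch2 : Int) (model : Int) (out : List Int) : Prop := ¬ D_gaba_onset gaba_time num_gabas num_branch2 model → out = gaba_onset_alt gaba_time num_gabas num_branch2 model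
instance (gaba_time : Int) (num_gabas : Int) (num_branch2 : Int) (model : Int) (out : List Int) : Decidable (Spec_gaba_onset gaba_time num_gabas num_branch2 model out) := by unfold Spec_gaba_onset; infer_instance

def pvDiffWitness_gaba_onset : Int × Int × Int × Int := (10, -1, 1, 0)
def pvDiffWitnessOut_gaba_onset : (List Int) × (List Int) := ([10, 10], [])

-- ===== CLAIM (what is proved, stated in full; the proofs are below) =====
def Claim_unchanged_gaba_onset : Prop := ∀ (gaba_time : Int) (num_gabas : Int) (num_branch2 : Int) (model : Int), Dom_gaba_onset gaba_time num_gabas num_branch2 model → Spec_gaba_onset gaba_time num_gabas num_branch2 model (gaba_onset gaba_time num_gabas num_branch2 model)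
def Claim_changed_gaba_onset : Prop := Dom_gaba_onset (pvDiffWitness_gaba_onset.1) (pvDiffWitness_gaba_onset.2.1) (pvDiffWitness_gaba_onset.2.2.1) (pvDiffWitness_gaba_onset.2.2.2) ∧ D_gaba_onset (pvDiffWitness_gaba_onset.1) (pvDiffWitness_gaba_onset.2.1) (pvDiffWitness_gaba_onset.2.2.1) (pvDiffWitness_gaba_onset.2.2.2) ∧ gaba_onset (pvDiffWitness_gaba_onset.1) (pvDiffWitness_gaba_onset.2.1) (pvDiffWitness_gaba_onset.2.2.1) (pvDiffWitness_gaba_onset.2.2.2) = pvDiffWitnessOut_gaba_onset.1 ∧ gaba_onset_alt (pvDiffWitness_gaba_onset.1) (pvDiffWitness_gaba_onset.2.1) (pvDiffWitness_gaba_onset.2.2.1) (pvDiffWitness_gaba_onset.2.2.2) = pvDiffWitnessOut_gaba_onset.2 ∧ pvDiffWitnessOut_gaba_onset.1 ≠ pvDiffWitnessOut_gaba_onset.2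
def Claim_exact_gaba_onset : Prop := ∀ (gaba_time : Int) (num_gabas : Int) (num_branch2 : Int) (model : Int), Dom_gaba_onset gaba_time num_gabas num_branch2 model → D_gaba_onset gaba_time num_gabas num_branch2 model → gaba_onset gaba_time num_gabas num_branch2 model ≠ gaba_onset_alt gaba_time num_gabas num_branch2 model

-- ===== LEMMAS AND PROOFS =====

lemma pv_rep_mul {α : Type} (l : List α) (a : Nat) : ∀ b,
    (List.replicate b (List.replicate a l).flatten).flatten = (List.replicate (a * b) l).flatten := by
  intro b; induction b with
  | zero => simp
  | succ k ih => rw [List.replicate_succ, List.flatten_cons, ih, Nat.mul_succ, Nat.add_comm,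
      List.replicate_add, List.flatten_append]

lemma pv_rep_rep {α : Type} (l : List α) (a b : Int) (ha : 0 ≤ a) :
    PySem.List.pyRepeat (PySem.List.pyRepeat l a) b = PySem.List.pyRepeat l (a * b) := by
  simp only [PySem.List.pyRepeat]
  have h : (a * b).toNat = a.toNat * b.toNat := by
    by_cases hb : 0 ≤ b
    · rw [Int.toNat_mul ha hb]
    · have h1 : (a * b).toNat = 0 := Int.toNat_of_nonpos (by nlinarith)
      have h2 : b.toNat = 0 := Int.toNat_of_nonpos (by omega)
      rw [h1, h2, Nat.mul_zero]
  rw [h, pv_rep_mul]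

lemma pv_trunc3 (n : Int) :
    PySem.Int.truncdiv n 3 =
      if 0 ≤ n then PySem.Int.floordiv n 3 else -(PySem.Int.floordiv (-n) 3) := by
  by_cases h : 0 ≤ n
  · rw [if_pos h, PySem.Int.floordiv_eq_ediv_of_pos (by omega), PySem.Int.truncdiv,
      Int.tdiv_eq_ediv_of_nonneg h]
  · rw [if_neg h, PySem.Int.floordiv_eq_ediv_of_pos (by omega), PySem.Int.truncdiv,
      ← Int.tdiv_eq_ediv_of_nonneg (by omega : (0:Int) ≤ -n), Int.neg_tdiv, neg_neg]

-- tiling at the element level: m copies of (range b).map f, read off by i % b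
lemma pv_flat_rep {α : Type} (f : Nat → α) (b : Nat) : ∀ m,
    (List.replicate m ((List.range b).map f)).flatten
      = (List.range (m * b)).map (fun i => f (i % b)) := by
  intro m; induction m with
  | zero => simp
  | succ k ih =>
    rw [List.replicate_succ, List.flatten_cons, ih,
      show (k + 1) * b = b + k * b by ring, List.range_add, List.map_append, List.map_map]
    congr 1
    · exact (List.map_congr_left (fun i hi => by
        rw [Nat.mod_eq_of_lt (List.mem_range.mp hi)])).symm
    · exact List.map_congr_left (fun i _ => by simp [Nat.add_mod_left])

-- per-element repetition, read off by i / k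
lemma pv_flatMap_rep {α : Type} (f : Nat → α) (k : Nat) (hk : 0 < k) : ∀ m,
    (List.range m).flatMap (fun j => List.replicate k (f j))
      = (List.range (m * k)).map (fun i => f (i / k)) := by
  intro m; induction m with
  | zero => simp
  | succ q ih =>
    rw [List.range_succ, List.flatMap_append, ih,
      show (q + 1) * k = q * k + k by ring, List.range_add, List.map_append, List.map_map]
    congr 1
    symm
    simp only [List.flatMap_cons, List.flatMap_nil, List.append_nil]
    rw [List.eq_replicate_iff]
    refine ⟨by simp, fun x hx => ?_⟩
    obtain ⟨i, hi, rfl⟩ := List.mem_map.mp hx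
    have hik : i < k := List.mem_range.mp hi
    simp only [Function.comp_def]
    rw [Nat.mul_comm q k, Nat.mul_add_div hk, Nat.div_eq_of_lt hik, Nat.add_zero]

-- central closed form: slicing the repeated block reads element i as gt + i % b
lemma pv_core (gt b reps ng : Int) (hb : 1 ≤ b) (hng : 0 ≤ ng) :
    PySem.List.slice (PySem.List.pyRepeat (PySem.List.pyRange gt (gt + b) 1) reps) none (some ng)
      = (PySem.List.pyRange 0 (min ng (b * reps)) 1).map (fun i => gt + PySem.Int.mod i b) := by
  by_cases hr : 0 ≤ reps
  · have hbm : gt + b - gt = b := by ring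
    rw [PySem.List.pyRepeat, PySem.List.pyRange_one, hbm,
      pv_flat_rep (fun i : Nat => gt + (i : Int)) b.toNat reps.toNat,
      PySem.List.slice_to _ hng, ← List.map_take, List.take_range, PySem.List.pyRange_one]
    simp only [Int.sub_zero, List.map_map]
    have hmin : (min ng (b * reps)).toNat = min ng.toNat (reps.toNat * b.toNat) := by
      have hB : b * reps = ((b.toNat * reps.toNat : Nat) : Int) := by
        push_cast; rw [Int.toNat_of_nonneg (by omega), Int.toNat_of_nonneg hr]
      rw [hB, Nat.mul_comm reps.toNat b.toNat]
      generalize (b.toNat * reps.toNat : Nat) = N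
      omega
    rw [hmin]
    refine List.map_congr_left (fun i hi => ?_)
    have hib : ((i : Int)) = ((i : Nat) : Int) := rfl
    have hbn : b = ((b.toNat : Nat) : Int) := by omega
    simp only [Function.comp_def, Int.zero_add]
    rw [hbn, PySem.Int.mod_natCast]
    simp
  · have h1 : PySem.List.pyRepeat (PySem.List.pyRange gt (gt + b) 1) reps = [] := by
      rw [PySem.List.pyRepeat, Int.toNat_of_nonpos (by omega)]; simp
    have h2 : PySem.List.pyRange 0 (min ng (b * reps)) 1 = [] :=
      PySem.List.pyRange_one_eq_nil (by nlinarith [min_le_right ng (b * reps)])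
    rw [h1, h2, PySem.List.slice_to _ hng]; simp

-- slicing the empty list yields the empty list for any stop
lemma pv_slice_nil (ng : Int) : PySem.List.slice ([] : List Int) none (some ng) = [] := by
  by_cases h : 0 ≤ ng
  · rw [PySem.List.slice_to _ h]; simp
  · have hk : ng = -(((-ng).toNat : Nat) : Int) := by omega
    rw [hk, PySem.List.slice_to_neg_natCast _ _ (by omega)]; simp

-- the per-onset repetition branch: element i of the flat list is gt + i // nb
lemma pv_repeat_branch (gt ng nb : Int) (hnb : 2 ≤ nb) (hng : 1 ≤ ng) :
    (PySem.List.pyRange gt (gt + ng) 1).flatMap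
        (fun x => (PySem.List.pyRange 0 nb 1).map (fun _ => x))
      = (PySem.List.pyRange 0 (ng * nb) 1).map (fun i => gt + PySem.Int.floordiv i nb) := by
  have hrep : ∀ x : Int, (PySem.List.pyRange 0 nb 1).map (fun _ => x)
      = List.replicate nb.toNat x := by
    intro x
    rw [PySem.List.pyRange_one, List.map_map, Int.sub_zero]
    simp only [Function.comp_def]
    rw [List.map_const', List.length_range]
  have hout : PySem.List.pyRange gt (gt + ng) 1
      = (List.range ng.toNat).map (fun j : Nat => gt + (j : Int)) := by
    rw [PySem.List.pyRange_one]; congr 1; ring_nf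
  simp only [hrep, hout, List.flatMap_map]
  rw [pv_flatMap_rep (fun j : Nat => gt + (j : Int)) nb.toNat (by omega) ng.toNat,
    PySem.List.pyRange_one, Int.sub_zero, List.map_map]
  have hn : (ng * nb).toNat = ng.toNat * nb.toNat := Int.toNat_mul (by omega) (by omega)
  rw [hn]
  refine List.map_congr_left (fun i _ => ?_)
  simp only [Function.comp_def, Int.zero_add]
  have hb : nb = ((nb.toNat : Nat) : Int) := by omega
  rw [hb, PySem.Int.floordiv_natCast]
  simp

-- ===== VERDICT (by name: the statement is the Claim_ definition above) =====
theorem gaba_onset_spec : Claim_unchanged_gaba_onset := by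
  intro gt ng nb model _
  unfold Spec_gaba_onset gaba_onset gaba_onset_alt
  intro hnD
  unfold D_gaba_onset at hnD
  by_cases hm : model = 0
  · rw [if_pos hm, if_neg (by simp [hm])]
    simp only [if_pos hm]
    rw [pv_rep_rep _ 3 nb (by omega), pv_trunc3]
    by_cases hng : 0 ≤ ng
    · rw [if_pos hng]
      have h := pv_core gt (PySem.Int.floordiv ng 3 + 1) (3 * nb) ng
        (by have hdv : PySem.Int.floordiv ng 3 = ng / 3 :=
              PySem.Int.floordiv_eq_ediv_of_pos (by omega)
            omega) hng
      rw [← add_assoc] at h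
      exact h
    · -- ng < 0 and ¬D_: both sides are empty
      rw [if_neg hng]
      have hrhs : PySem.List.pyRange 0 (min ng ((PySem.Int.floordiv ng 3 + 1) * (3 * nb))) 1 = [] :=
        PySem.List.pyRange_one_eq_nil (by
          have := min_le_left ng ((PySem.Int.floordiv ng 3 + 1) * (3 * nb)); omega)
      rw [hrhs, List.map_nil]
      by_cases h3 : ng ≤ -3
      · have hblk : PySem.List.pyRange gt (gt + -(PySem.Int.floordiv (-ng) 3) + 1) 1 = [] :=
          PySem.List.pyRange_one_eq_nil (by
            have hdv : PySem.Int.floordiv (-ng) 3 = (-ng) / 3 :=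
              PySem.Int.floordiv_eq_ediv_of_pos (by omega)
            omega)
        rw [hblk]
        have : PySem.List.pyRepeat ([] : List Int) (3 * nb) = [] := by
          simp [PySem.List.pyRepeat]
        rw [this, pv_slice_nil]
      · have hnb : nb ≤ 0 := by
          rcases (by omega : ng = -1 ∨ ng = -2) with h | h <;> [skip; skip] <;>
            by_contra hc <;> exact hnD ⟨hm, by omega, by omega⟩
        have : PySem.List.pyRepeat
            (PySem.List.pyRange gt (gt + -(PySem.Int.floordiv (-ng) 3) + 1) 1) (3 * nb) = [] := by
          rw [PySem.List.pyRepeat, Int.toNat_of_nonpos (by omega)]; simp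
        rw [this, pv_slice_nil]
  · by_cases hb01 : nb = 0 ∨ nb = 1
    · rw [if_neg hm, if_pos hb01, if_neg (show ¬(model ≠ 0 ∧ ¬(nb = 0 ∨ nb = 1)) by tauto)]
      simp only [if_neg hm]
      by_cases h4 : ng < 4
      · simp only [if_pos h4]
        by_cases hpos : 1 ≤ ng
        · have h1 : PySem.List.pyRange gt (gt + ng) 1
              = PySem.List.pyRepeat (PySem.List.pyRange gt (gt + ng) 1) 1 := by
            simp [PySem.List.pyRepeat]
          rw [h1]
          exact pv_core gt ng 1 ng hpos (by omega)
        · have hlhs : PySem.List.pyRange gt (gt + ng) 1 = [] :=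
            PySem.List.pyRange_one_eq_nil (by omega)
          have hrhs : PySem.List.pyRange 0 (min ng (ng * 1)) 1 = [] :=
            PySem.List.pyRange_one_eq_nil (by omega)
          rw [hlhs, hrhs, pv_slice_nil, List.map_nil]
      · have hng : (0:Int) ≤ ng := by omega
        have hdiv : PySem.Int.floordiv ng 3 = ng / 3 :=
          PySem.Int.floordiv_eq_ediv_of_pos (by omega)
        by_cases h3 : PySem.Int.mod ng 3 = 0
        · simp only [if_neg h4, if_pos h3]
          rw [pv_rep_rep _ 3 nb (by omega), pv_trunc3, if_pos hng]
          exact pv_core gt (PySem.Int.floordiv ng 3) (3 * nb) ng (by omega) hng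
        · simp only [if_neg h4, if_neg h3]
          rw [pv_rep_rep _ 3 nb (by omega), pv_trunc3, if_pos hng]
          have h := pv_core gt (PySem.Int.floordiv ng 3 + 1) (3 * nb) ng (by omega) hng
          rw [← add_assoc] at h
          exact h
    · rw [if_neg hm, if_neg hb01, if_pos ⟨hm, hb01⟩]
      by_cases hnb2 : 2 ≤ nb
      · by_cases hng1 : 1 ≤ ng
        · rw [show max ng 0 = ng by omega, show max nb 0 = nb by omega]
          exact pv_repeat_branch gt ng nb hnb2 hng1
        · have hlhs : PySem.List.pyRange gt (gt + ng) 1 = [] :=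
            PySem.List.pyRange_one_eq_nil (by omega)
          rw [hlhs, show max ng 0 = 0 by omega, zero_mul]
          simp [PySem.List.pyRange_zero]
      · -- nb ≤ -1: the inner range is empty on both readings
        have hnb : nb ≤ -1 := by omega
        have hin : ∀ x : Int, (PySem.List.pyRange 0 nb 1).map (fun _ => x) = [] := by
          intro x; rw [PySem.List.pyRange_one_eq_nil (by omega)]; rfl
        simp only [hin, show max nb 0 = 0 by omega, mul_zero]
        simp

theorem gaba_onset_changed : Claim_changed_gaba_onset := by
  unfold Claim_changed_gaba_onset; decide

theorem gaba_onset_tight : Claim_exact_gaba_onset := by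
  intro gt ng nb model _ hD
  obtain ⟨hm, hng, hnb⟩ := hD
  unfold gaba_onset gaba_onset_alt
  rw [if_pos hm, if_neg (by simp [hm])]
  simp only [if_pos hm]
  have hrhs : PySem.List.pyRange 0 (min ng ((PySem.Int.floordiv ng 3 + 1) * (3 * nb))) 1 = [] :=
    PySem.List.pyRange_one_eq_nil (by
      have := min_le_left ng ((PySem.Int.floordiv ng 3 + 1) * (3 * nb)); omega)
  rw [hrhs, List.map_nil]
  have htr : PySem.Int.truncdiv ng 3 = 0 := by
    rw [pv_trunc3, if_neg (by omega)]
    have hdv : PySem.Int.floordiv (-ng) 3 = (-ng) / 3 :=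
      PySem.Int.floordiv_eq_ediv_of_pos (by omega)
    omega
  rw [htr, pv_rep_rep _ 3 nb (by omega)]
  have hblk : PySem.List.pyRange gt (gt + 0 + 1) 1 = [gt] := by
    rw [show gt + 0 + 1 = gt + 1 by ring, PySem.List.pyRange_one_singleton]
  rw [hblk, PySem.List.pyRepeat_singleton]
  have hm3 : 3 ≤ (3 * nb).toNat := by omega
  intro hcontra
  rcases hng with h | h
  · rw [h, PySem.List.slice_to_neg_one, List.dropLast_replicate] at hcontra
    have := congrArg List.length hcontra
    simp at this
    omega
  · rw [h, show ((-2 : Int)) = -((2:Nat) : Int) by norm_num,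
      PySem.List.slice_to_neg_natCast _ _ (by omega), List.take_replicate,
      List.length_replicate] at hcontra
    have := congrArg List.length hcontra
    simp at this
    omega
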